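-- pv_equiv track=rewrite | github.com/mage-knight-digital/MageKnight | packages/python-sdk/scripts/replay_policy.py | _format_card_list
-- ===== SOURCE A (Python) =====
-- def _card_name(card_id: str) -> str:
--     """Convert card ID to readable name."""
--     return card_id.replace("_", " ").replace("arythea ", "").title()
--
-- def _format_card_list(cards: list) -> str:
--     """Format a card list grouping duplicates (e.g., '2x March, Stamina')."""
--     from collections import Counter
--     counts = Counter(cards)
--     parts = []
--     for card in sorted(counts):
--         n = counts[card]
--         name = _card_name(card)
--         parts.append(f"{n}x {name}" if n > 1 else name)
--     return ", ".join(parts)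
-- ===== SOURCE B (Python) =====
-- def _card_name(card_id: str) -> str:
--     """Convert card ID to readable name."""
--     return card_id.replace("_", " ").replace("arythea ", "").title()
--
-- def _format_card_list(cards: list) -> str:
--     """Format a card list grouping duplicates: sort once, then emit run-lengths in one pass."""
--     parts = []
--     ordered = sorted(cards)
--     i = 0
--     while i < len(ordered):
--         j = i + 1
--         while j < len(ordered) and ordered[j] == ordered[i]:
--             j += 1
--         n = j - i
--         name = _card_name(ordered[i])
--         parts.append(f"{n}x {name}" if n > 1 else name)
--         i = j
--     return ", ".join(parts)
-- ===== Notes on version B (the rewrite author's own statement) =====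
-- stated objective: alternative
-- what changed: B replaces 'build a Counter, then sort the distinct keys and look each count up' with 'sort the whole list once and run-length encode consecutive equal cards in a single pass'.
import Mathlib
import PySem

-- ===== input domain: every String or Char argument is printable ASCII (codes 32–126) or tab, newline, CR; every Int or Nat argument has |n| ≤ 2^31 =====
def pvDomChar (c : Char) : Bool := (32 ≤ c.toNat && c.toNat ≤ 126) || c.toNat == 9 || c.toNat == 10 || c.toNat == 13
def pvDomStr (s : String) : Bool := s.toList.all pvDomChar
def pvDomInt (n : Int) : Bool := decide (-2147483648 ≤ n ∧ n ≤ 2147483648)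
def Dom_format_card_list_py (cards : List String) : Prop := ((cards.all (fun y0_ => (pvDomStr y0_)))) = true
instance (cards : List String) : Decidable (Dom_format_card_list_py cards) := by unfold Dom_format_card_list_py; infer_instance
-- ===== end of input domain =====

-- B replaces "Counter, then sort the distinct keys and look counts up" with "sort once,
-- then run-length encode consecutive equal cards in one pass"; same cost, different traversal.

-- ===== PORT A =====

-- str.title() ported by hand over List Char: a letter after a non-letter is uppercased,
-- a letter after a letter is lowercased, other characters unchanged — exact on ASCII,
-- where Python's "cased" characters are exactly the letters.
def pvTitleChars : Bool → List Char → List Char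
  | _, [] => []
  | prev, c :: cs =>
    (if PySem.Chars.isalpha c then
        (if prev then PySem.Chars.lowerChar c else PySem.Chars.upperChar c)
      else c) :: pvTitleChars (PySem.Chars.isalpha c) cs

-- shared module helper _card_name (used by both Pythons)
def card_name (card_id : String) : String :=
  String.ofList (pvTitleChars false
    (PySem.Str.replace (PySem.Str.replace card_id "_" " ") "arythea " "").toList)

def format_card_list_py (cards : List String) : String :=
  let counts := PySem.Dict.counter cards
  let parts := (PySem.List.sorted counts.keys (fun x => x) false).foldl
    (fun parts card =>
      let n := counts.getD card 0
      let name := card_name card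
      parts ++ [if n > 1 then PySem.Int.toStr n ++ "x " ++ name else name])
    ([] : List String)
  PySem.Str.join ", " parts

-- ===== PORT B =====

-- the outer while loop of Source B: take the run of cards equal to the head, emit its part,
-- continue on the remainder (rest = rest[n:])
def altLoop : List String → List String
  | [] => []
  | head :: tl =>
    let run := tl.takeWhile (fun y => y == head)
    let n : Int := (run.length : Int) + 1
    let name := card_name head
    (if n > 1 then PySem.Int.toStr n ++ "x " ++ name else name)
      :: altLoop (tl.dropWhile (fun y => y == head))
termination_by l => l.length
decreasing_by
  simp only [List.length_cons]
  exact Nat.lt_succ_of_le (List.Sublist.length_le (List.dropWhile_sublist _))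

def format_card_list_py_alt (cards : List String) : String :=
  PySem.Str.join ", " (altLoop (PySem.List.sorted cards (fun x => x) false))

-- ===== PRECONDITION & SPEC =====
def Spec_format_card_list_py (cards : List String) (out : String) : Prop := out = format_card_list_py_alt cards
instance (cards : List String) (out : String) : Decidable (Spec_format_card_list_py cards out) := by unfold Spec_format_card_list_py; infer_instance

-- ===== CLAIM (what is proved, stated in full; the proofs are below) =====
def Claim_equal_format_card_list_py : Prop := ∀ (cards : List String), Dom_format_card_list_py cards → Spec_format_card_list_py cards (format_card_list_py cards)

-- ===== LEMMAS AND PROOFS =====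

-- the part emitted for a card with count n
def pvPart (n : Int) (k : String) : String :=
  if n > 1 then PySem.Int.toStr n ++ "x " ++ card_name k else card_name k

theorem pv_foldl_append_map {α β : Type} (f : α → β) :
    ∀ (l : List α) (a : List β),
      l.foldl (fun acc c => acc ++ [f c]) a = a ++ l.map f := by
  intro l
  induction l with
  | nil => simp
  | cons x xs ih => intro a; simp [List.foldl_cons, ih]

theorem altLoop_eq : ∀ (l : List String), l.Pairwise (· ≤ ·) →
    altLoop l =
      (PySem.List.sorted (PySem.Set.ofList l) (fun x => x)).map
        (fun k => pvPart (l.count k) k) := by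
  intro l
  induction l using altLoop.induct with
  | case1 =>
    intro _
    have hnil : PySem.List.sorted (PySem.Set.ofList ([] : List String)) (fun x => x) = [] :=
      (PySem.List.sorted_eq_nil_iff _ _ _).2 rfl
    rw [hnil]
    simp [altLoop]
  | case2 head tl ih =>
    intro hs
    obtain ⟨hhd, htl⟩ := List.pairwise_cons.1 hs
    have hrest_pw : (tl.dropWhile (fun y => y == head)).Pairwise (· ≤ ·) :=
      htl.sublist (List.dropWhile_sublist _)
    have hlt : ∀ y ∈ tl.dropWhile (fun y => y == head), head < y := by
      intro y hy
      cases hr : tl.dropWhile (fun y => y == head) with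
      | nil => rw [hr] at hy; cases hy
      | cons r0 rt =>
        have hw : tl.dropWhile (fun y => y == head) ≠ [] := by rw [hr]; simp
        have hne0 := List.head_dropWhile_not (fun y => y == head) hw
        simp only [hr] at hne0
        simp at hne0
        have hr0tl : r0 ∈ tl := (List.dropWhile_sublist _).subset (by rw [hr]; exact List.mem_cons_self)
        have hr0 : head < r0 := lt_of_le_of_ne (hhd r0 hr0tl) (Ne.symm hne0)
        rw [hr] at hy
        rcases List.mem_cons.1 hy with rfl | hyrt
        · exact hr0
        · have := hrest_pw
          rw [hr] at this
          exact lt_of_lt_of_le hr0 ((List.pairwise_cons.1 this).1 y hyrt)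
    have hnot : head ∉ tl.dropWhile (fun y => y == head) := fun h => lt_irrefl _ (hlt _ h)
    have hrun : ∀ y ∈ tl.takeWhile (fun y => y == head), y = head := by
      intro y hy
      have := List.mem_takeWhile_imp hy
      simpa using this
    have hsplit : tl.takeWhile (fun y => y == head) ++ tl.dropWhile (fun y => y == head) = tl :=
      List.takeWhile_append_dropWhile
    have hcount_head : (head :: tl).count head = (tl.takeWhile (fun y => y == head)).length + 1 := by
      rw [List.count_cons_self]
      congr 1
      conv_lhs => rw [← hsplit]
      rw [List.count_append]
      have h1 : (tl.takeWhile (fun y => y == head)).count head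
          = (tl.takeWhile (fun y => y == head)).length :=
        List.count_eq_length.2 (fun b hb => by rw [hrun b hb])
      have h2 : (tl.dropWhile (fun y => y == head)).count head = 0 := List.count_eq_zero.2 hnot
      omega
    have hcount_rest : ∀ k ∈ tl.dropWhile (fun y => y == head),
        (head :: tl).count k = (tl.dropWhile (fun y => y == head)).count k := by
      intro k hk
      have hkne : head ≠ k := ne_of_lt (hlt k hk)
      have h0 : (tl.takeWhile (fun y => y == head)).count k = 0 :=
        List.count_eq_zero.2 (fun hkk => hkne.symm (hrun k hkk))
      have hb : (head == k) = false := beq_eq_false_iff_ne.2 hkne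
      rw [List.count_cons, hb]
      conv_lhs => rw [← hsplit]
      rw [List.count_append, h0]
      simp
    have hkeys : PySem.List.sorted (PySem.Set.ofList (head :: tl)) (fun x => x) =
        head :: PySem.List.sorted (PySem.Set.ofList (tl.dropWhile (fun y => y == head))) (fun x => x) := by
      apply PySem.List.sorted_eq_of_perm_of_pairwise_lt
      · have hnd : (head :: PySem.List.sorted
            (PySem.Set.ofList (tl.dropWhile (fun y => y == head))) (fun x => x)).Nodup := by
          refine List.nodup_cons.2 ⟨?_, ?_⟩
          · rw [PySem.List.mem_sorted, PySem.Set.mem_ofList]; exact hnot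
          · exact ((PySem.List.sorted_perm _ _ _).nodup_iff).2 (PySem.Set.nodup_ofList _)
        rw [List.perm_ext_iff_of_nodup hnd (PySem.Set.nodup_ofList _)]
        intro a
        simp only [List.mem_cons, PySem.List.mem_sorted, PySem.Set.mem_ofList]
        constructor
        · rintro (rfl | ha)
          · exact Or.inl rfl
          · exact Or.inr ((List.dropWhile_sublist _).subset ha)
        · rintro (rfl | ha)
          · exact Or.inl rfl
          · rw [← hsplit] at ha
            rcases List.mem_append.1 ha with h | h
            · exact Or.inl (hrun a h)
            · exact Or.inr h
      · refine List.pairwise_cons.2 ⟨?_, PySem.List.sorted_ofList_pairwise_lt _⟩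
        intro y hy
        rw [PySem.List.mem_sorted, PySem.Set.mem_ofList] at hy
        exact hlt y hy
    rw [altLoop, hkeys, List.map_cons]
    congr 1
    · simp only [pvPart, hcount_head, Nat.cast_add, Nat.cast_one]
    · rw [ih hrest_pw]
      apply List.map_congr_left
      intro k hk
      rw [PySem.List.mem_sorted, PySem.Set.mem_ofList] at hk
      rw [hcount_rest k hk]

theorem format_card_list_py_spec : Claim_equal_format_card_list_py := by
  intro cards _
  show format_card_list_py cards = format_card_list_py_alt cards
  have hS : (PySem.List.sorted cards (fun x => x)).Pairwise (· ≤ ·) :=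
    PySem.List.sorted_pairwise cards (fun x => x)
  have hperm : (PySem.List.sorted cards (fun x => x)).Perm cards :=
    PySem.List.sorted_perm cards (fun x => x) false
  have hkeys : PySem.List.sorted (PySem.Set.ofList (PySem.List.sorted cards (fun x => x))) (fun x => x)
      = PySem.List.sorted (PySem.Set.ofList cards) (fun x => x) := by
    apply PySem.List.sorted_eq_of_perm_of_pairwise_lt
    · refine (PySem.List.sorted_perm _ _ _).trans ?_
      rw [List.perm_ext_iff_of_nodup (PySem.Set.nodup_ofList _) (PySem.Set.nodup_ofList _)]
      intro a
      rw [PySem.Set.mem_ofList, PySem.Set.mem_ofList, PySem.List.mem_sorted]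
    · exact PySem.List.sorted_ofList_pairwise_lt _
  simp only [format_card_list_py, format_card_list_py_alt]
  rw [PySem.Dict.keys_counter, pv_foldl_append_map, altLoop_eq _ hS, hkeys]
  refine congrArg _ ?_
  simp only [List.nil_append]
  apply List.map_congr_left
  intro k _
  rw [PySem.Dict.getD_counter, pvPart, hperm.count_eq]
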